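-- pv_equiv track=rewrite | github.com/jmazala/codeforces | 1398C/main.py | good_subarrays
-- ===== SOURCE A (Python) =====
-- from collections import defaultdict
--
-- def good_subarrays(arr) -> int:
--     answer = 0
--     sum = 0
--     map = defaultdict(int)
--     map[0] = 1
--
--     for i, num in enumerate(arr):
--         sum += num
--         answer += map[sum - i - 1]
--         map[sum - i - 1] += 1
--
--     return answer
-- ===== SOURCE B (Python) =====
-- def good_subarrays(arr) -> int:
--     answer = 0
--     suffix = arr
--     while suffix:
--         s = 0
--         length = 0
--         for x in suffix:
--             s += x
--             length += 1
--             if s == length: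
--                 answer += 1
--         suffix = suffix[1:]
--     return answer
-- ===== Notes on version B (the rewrite author's own statement) =====
-- stated objective: alternative
-- what changed: Replaced the single-pass prefix-sum hashmap counter with a direct scan of every suffix, incrementing the answer whenever a window's running sum equals its length; no dictionary is kept.
import Mathlib
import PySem

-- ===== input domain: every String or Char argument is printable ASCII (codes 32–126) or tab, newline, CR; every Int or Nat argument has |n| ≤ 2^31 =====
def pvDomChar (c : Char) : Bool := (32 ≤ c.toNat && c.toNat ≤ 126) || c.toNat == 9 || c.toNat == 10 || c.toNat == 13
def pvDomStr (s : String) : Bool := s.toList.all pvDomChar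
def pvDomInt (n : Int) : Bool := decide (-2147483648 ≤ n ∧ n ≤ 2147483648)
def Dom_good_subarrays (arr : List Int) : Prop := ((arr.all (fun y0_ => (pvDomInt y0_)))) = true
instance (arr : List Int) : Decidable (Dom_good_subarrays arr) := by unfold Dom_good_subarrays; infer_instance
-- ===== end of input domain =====

-- B replaces A's single-pass prefix-sum hashmap count with a plain scan of every
-- suffix (no dictionary); same return value, no speed claim.

-- ===== PORT A =====
-- state = (answer, sum, map); the defaultdict read-then-increment is getD / modify
def good_subarrays (arr : List Int) : Int :=
  (((PySem.List.enumerate arr 0).foldl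
    (fun (st : Int × Int × PySem.Dict Int Int) p =>
      let sum := st.2.1 + p.2
      let key := sum - p.1 - 1
      let answer := st.1 + st.2.2.getD key 0
      (answer, sum, st.2.2.modify key 0 (· + 1)))
    (0, 0, PySem.Dict.empty.insert 0 1))).1

-- ===== PORT B =====
-- the while-loop over suffixes; inner for-loop threads (s, length, answer)
def good_subarrays_altLoop : List Int → Int → Int
  | [], answer => answer
  | x :: rest, answer =>
      let st := ((x :: rest).foldl
        (fun (st : Int × Int × Int) y =>
          let s := st.1 + y
          let length := st.2.1 + 1
          (s, length, if s = length then st.2.2 + 1 else st.2.2))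
        (0, 0, answer))
      good_subarrays_altLoop (PySem.List.slice (x :: rest) (some 1) none) st.2.2
  termination_by l _ => l.length
  decreasing_by simp [PySem.List.slice_from_one]

def good_subarrays_alt (arr : List Int) : Int := good_subarrays_altLoop arr 0

-- ===== PRECONDITION & SPEC =====
def Spec_good_subarrays (arr : List Int) (out : Int) : Prop := out = good_subarrays_alt arr
instance (arr : List Int) (out : Int) : Decidable (Spec_good_subarrays arr out) := by unfold Spec_good_subarrays; infer_instance

-- ===== CLAIM (what is proved, stated in full; the proofs are below) =====
def Claim_equal_good_subarrays : Prop := ∀ (arr : List Int), Dom_good_subarrays arr → Spec_good_subarrays arr (good_subarrays arr)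

-- ===== LEMMAS AND PROOFS =====

-- keysTail c xs: the values (prefix-sum − index) after each step, starting from c
def pvKeysTail (c : Int) : List Int → List Int
  | [] => []
  | x :: xs => (c + x - 1) :: pvKeysTail (c + x - 1) xs

def pvKeys (c : Int) (xs : List Int) : List Int := c :: pvKeysTail c xs

-- Int-valued occurrence count
def pvCnt (k : Int) : List Int → Int
  | [] => 0
  | x :: xs => (if x = k then 1 else 0) + pvCnt k xs

-- equal-pair count of a key list, grouped by the earlier element
def pvPc : List Int → Int
  | [] => 0
  | k :: ks => pvCnt k ks + pvPc ks

theorem pvCnt_eq_count (k : Int) (l : List Int) : pvCnt k l = (l.count k : Int) := by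
  induction l with
  | nil => rfl
  | cons x xs ih =>
      by_cases h : x = k
      · simp [pvCnt, ih, h]
        omega
      · simp [pvCnt, ih, h]

theorem pvCnt_append_singleton (k x : Int) (l : List Int) :
    pvCnt k (l ++ [x]) = pvCnt k l + (if x = k then 1 else 0) := by
  induction l with
  | nil => simp [pvCnt]
  | cons y ys ih => simp [pvCnt, ih]; ring

theorem pvPc_append_singleton (x : Int) (l : List Int) :
    pvPc (l ++ [x]) = pvPc l + pvCnt x l := by
  induction l with
  | nil => simp [pvPc, pvCnt]
  | cons k ks ih =>
      simp [pvPc, ih, pvCnt_append_singleton]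
      by_cases h : x = k
      · subst h; simp [pvCnt]; ring
      · have h' : ¬ k = x := fun hh => h hh.symm
        simp [pvCnt, h, h']; ring

theorem pvKeysTail_shift (xs : List Int) (t : Int) : ∀ c,
    pvKeysTail (c + t) xs = (pvKeysTail c xs).map (fun k => k + t) := by
  induction xs with
  | nil => intro c; rfl
  | cons x xs ih =>
      intro c
      simp only [pvKeysTail, List.map]
      rw [show c + t + x - 1 = c + x - 1 + t by ring, ih (c + x - 1)]

theorem pvCnt_map_add (k t : Int) (l : List Int) :
    pvCnt (k + t) (l.map (fun a => a + t)) = pvCnt k l := by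
  induction l with
  | nil => rfl
  | cons x xs ih =>
      simp only [List.map, pvCnt, ih]
      by_cases h : x = k
      · simp [h]
      · have h' : ¬ x + t = k + t := by omega
        simp [h, h']

theorem pvPc_map_add (t : Int) (l : List Int) :
    pvPc (l.map (fun a => a + t)) = pvPc l := by
  induction l with
  | nil => rfl
  | cons k ks ih => simp only [List.map, pvPc, ih, pvCnt_map_add]

-- ---- A side ----

def pvG (d : PySem.Dict Int Int) : List Int → Int
  | [] => 0
  | k :: ks => d.getD k 0 + pvG (d.modify k 0 (· + 1)) ks

theorem pvG_counter (ks : List Int) : ∀ L : List Int,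
    pvG (PySem.Dict.counter L) ks = pvPc (L ++ ks) - pvPc L := by
  induction ks with
  | nil => intro L; simp [pvG]
  | cons k ks ih =>
      intro L
      have h1 : (PySem.Dict.counter L).modify k 0 (· + 1) = PySem.Dict.counter (L ++ [k]) := by
        rw [PySem.Dict.counter_append_singleton]
      rw [pvG, h1, ih (L ++ [k]), PySem.Dict.getD_counter,
        show L ++ k :: ks = (L ++ [k]) ++ ks by simp, pvPc_append_singleton, ← pvCnt_eq_count]
      ring

theorem pvA_fold (xs : List Int) : ∀ (i0 ans s : Int) (d : PySem.Dict Int Int),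
    ((PySem.List.enumerate xs i0).foldl
      (fun (st : Int × Int × PySem.Dict Int Int) p =>
        let sum := st.2.1 + p.2
        let key := sum - p.1 - 1
        let answer := st.1 + st.2.2.getD key 0
        (answer, sum, st.2.2.modify key 0 (· + 1)))
      (ans, s, d)).1 = ans + pvG d (pvKeysTail (s - i0) xs) := by
  induction xs with
  | nil => intro i0 ans s d; simp [PySem.List.enumerate_nil, pvKeysTail, pvG]
  | cons x xs ih =>
      intro i0 ans s d
      rw [PySem.List.enumerate_cons]
      simp only [List.foldl]
      rw [ih (i0 + 1) _ (s + x) _]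
      simp only [pvKeysTail, pvG]
      rw [show s + x - (i0 + 1) = s + x - i0 - 1 by ring,
          show s - i0 + x - 1 = s + x - i0 - 1 by ring]
      ring

theorem pvA_eq (arr : List Int) : good_subarrays arr = pvPc (pvKeys 0 arr) := by
  have h0 : PySem.Dict.empty.insert 0 1 = PySem.Dict.counter ([0] : List Int) := by decide
  rw [good_subarrays, pvA_fold arr 0 0 0, h0, pvG_counter]
  simp [pvKeys, pvPc, pvCnt]

-- ---- B side ----

theorem pvInner_fold (ys : List Int) : ∀ (s l a : Int),
    ((ys.foldl
      (fun (st : Int × Int × Int) y =>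
        let s := st.1 + y
        let length := st.2.1 + 1
        (s, length, if s = length then st.2.2 + 1 else st.2.2))
      (s, l, a))).2.2 = a + pvCnt 0 (pvKeysTail (s - l) ys) := by
  induction ys with
  | nil => intro s l a; simp [pvKeysTail, pvCnt]
  | cons y ys ih =>
      intro s l a
      simp only [List.foldl]
      rw [ih (s + y) (l + 1)]
      simp only [pvKeysTail, pvCnt]
      rw [show s + y - (l + 1) = s - l + y - 1 by ring]
      by_cases h : s + y = l + 1
      · have h' : s - l + y - 1 = 0 := by omega
        simp [h, h']; ring
      · have h' : ¬ (s - l + y - 1 = 0) := by omega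
        simp [h, h']

theorem pvAltLoop_eq (xs : List Int) : ∀ ans, good_subarrays_altLoop xs ans = ans + pvPc (pvKeys 0 xs) := by
  induction xs with
  | nil => intro ans; simp [good_subarrays_altLoop, pvKeys, pvKeysTail, pvPc, pvCnt]
  | cons x xs ih =>
      intro ans
      rw [good_subarrays_altLoop]
      simp only [PySem.List.slice_from_one, List.tail_cons]
      rw [ih, pvInner_fold]
      have hshift : pvKeysTail (0 + (x - 1)) xs = (pvKeysTail 0 xs).map (fun k => k + (x - 1)) :=
        pvKeysTail_shift xs (x - 1) 0
      have hpc : pvPc (pvKeysTail (x - 1) xs) = pvPc (pvKeysTail 0 xs) := by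
        rw [show (x - 1 : Int) = 0 + (x - 1) by ring, hshift, pvPc_map_add]
      have hcnt : pvCnt (x - 1) (pvKeysTail (x - 1) xs) = pvCnt 0 (pvKeysTail 0 xs) := by
        rw [show (x - 1 : Int) = 0 + (x - 1) by ring, hshift, pvCnt_map_add]
      rw [show (0 : Int) - 0 = 0 by rfl]
      simp only [pvKeys, pvPc, pvKeysTail, pvCnt]
      rw [show (0 : Int) + x - 1 = x - 1 by ring, hpc, hcnt]
      ring

-- ===== VERDICT (by name: the statement is the Claim_ definition above) =====
theorem good_subarrays_spec : Claim_equal_good_subarrays := by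
  intro arr _
  show good_subarrays arr = good_subarrays_alt arr
  rw [pvA_eq, good_subarrays_alt, pvAltLoop_eq]
  ring
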